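-- pv_equiv track=rewrite | github.com/robinl24/QualtricsPartialResponseDownloader | PartialResponseDownloader.py | duplicateFinder
-- ===== SOURCE A (Python) =====
-- def duplicateFinder(listInput,item,usedList):
--     start_at = -1
--     while True:
--         try:
--             loc = listInput.index(item,start_at+1)
--         except ValueError:
--             loc=-1
--             break
--         if loc not in usedList:
--             usedList.append(loc)
--             break
--         elif loc in usedList:
--             start_at = loc
--
--
--     return loc,usedList
-- ===== SOURCE B (Python) =====
-- def duplicateFinder(listInput, item, usedList):
--     for i, v in enumerate(listInput):
--         if v == item and i not in usedList:
--             usedList.append(i)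
--             return i, usedList
--     return -1, usedList
-- ===== Notes on version B (the rewrite author's own statement) =====
-- stated objective: simpler
-- what changed: Replaces the while-True/try-except loop of repeated .index(item, start+1) calls with one enumerate pass that tests v == item and i not in usedList directly.
import Mathlib
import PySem

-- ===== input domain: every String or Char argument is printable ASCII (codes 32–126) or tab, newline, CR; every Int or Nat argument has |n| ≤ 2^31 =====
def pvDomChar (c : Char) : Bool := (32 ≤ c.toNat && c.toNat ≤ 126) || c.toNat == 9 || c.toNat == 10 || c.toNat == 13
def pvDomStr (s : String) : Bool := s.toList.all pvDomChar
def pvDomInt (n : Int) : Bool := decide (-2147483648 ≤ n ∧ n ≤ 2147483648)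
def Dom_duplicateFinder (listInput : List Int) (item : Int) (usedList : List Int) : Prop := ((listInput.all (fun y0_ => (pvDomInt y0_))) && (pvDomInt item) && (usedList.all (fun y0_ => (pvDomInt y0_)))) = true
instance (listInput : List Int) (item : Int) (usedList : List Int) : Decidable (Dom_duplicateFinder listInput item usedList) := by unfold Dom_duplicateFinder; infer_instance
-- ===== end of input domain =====

-- B performs the same in-place append to usedList as A; the equivalence proved here covers the
-- full returned pair (index, updated usedList), which carries that effect.

-- ===== PORT A =====
-- A's while-True loop: listInput.index(item, start_at+1) with the cursor start_at restarting at
-- each already-used location; 'start' below is start_at+1 (always ≥ 0 in A, since start_at is -1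
-- or a found index).  index(item, start) is ported as PySem.List.index? on the drop, offset back.
def duplicateFinderLoopA (listInput : List Int) (item : Int) (usedList : List Int) (start : Nat) : Int × List Int :=
  match h : PySem.List.index? (listInput.drop start) item with
  | none => (-1, usedList)                            -- except ValueError: loc = -1; break
  | some k =>
    if ((start + k : Nat) : Int) ∈ usedList then      -- elif loc in usedList: start_at = loc
      duplicateFinderLoopA listInput item usedList (start + k + 1)
    else                                              -- if loc not in usedList: append; break
      (((start + k : Nat) : Int), usedList ++ [((start + k : Nat) : Int)])
termination_by listInput.length - start
decreasing_by
  obtain ⟨hk, -, -⟩ := PySem.List.getElem_of_index?_eq_some h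
  simp only [List.length_drop] at hk
  omega

def duplicateFinder (listInput : List Int) (item : Int) (usedList : List Int) : Int × List Int :=
  duplicateFinderLoopA listInput item usedList 0

-- ===== PORT B =====
-- B's single enumerate pass: walk the list with an index counter, test directly.
def duplicateFinderLoopB (xs : List Int) (item : Int) (usedList : List Int) (i : Nat) : Int × List Int :=
  match xs with
  | [] => (-1, usedList)
  | v :: rest =>
    if v = item ∧ (i : Int) ∉ usedList then
      ((i : Int), usedList ++ [(i : Int)])
    else
      duplicateFinderLoopB rest item usedList (i + 1)

def duplicateFinder_alt (listInput : List Int) (item : Int) (usedList : List Int) : Int × List Int :=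
  duplicateFinderLoopB listInput item usedList 0

-- ===== PRECONDITION & SPEC =====
def Spec_duplicateFinder (listInput : List Int) (item : Int) (usedList : List Int) (out : Int × List Int) : Prop := out = duplicateFinder_alt listInput item usedList
instance (listInput : List Int) (item : Int) (usedList : List Int) (out : Int × List Int) : Decidable (Spec_duplicateFinder listInput item usedList out) := by unfold Spec_duplicateFinder; infer_instance

-- ===== CLAIM (what is proved, stated in full; the proofs are below) =====
def Claim_equal_duplicateFinder : Prop := ∀ (listInput : List Int) (item : Int) (usedList : List Int), Dom_duplicateFinder listInput item usedList → Spec_duplicateFinder listInput item usedList (duplicateFinder listInput item usedList)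

-- ===== LEMMAS AND PROOFS =====

-- B's loop returns (-1, used) when the item does not occur in the remaining list.
theorem loopB_of_not_mem (xs : List Int) (item : Int) (used : List Int) (i : Nat)
    (h : item ∉ xs) : duplicateFinderLoopB xs item used i = (-1, used) := by
  induction xs generalizing i with
  | nil => rfl
  | cons v rest ih =>
    simp only [List.mem_cons, not_or] at h
    rw [duplicateFinderLoopB, if_neg (fun hc => h.1 hc.1.symm)]
    exact ih (i + 1) h.2

-- B's loop skips a prefix free of the item, advancing the counter by its length.
theorem loopB_append_not_mem (pre xs : List Int) (item : Int) (used : List Int) (i : Nat)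
    (h : item ∉ pre) :
    duplicateFinderLoopB (pre ++ xs) item used i
      = duplicateFinderLoopB xs item used (i + pre.length) := by
  induction pre generalizing i with
  | nil => simp
  | cons v rest ih =>
    simp only [List.mem_cons, not_or] at h
    rw [List.cons_append, duplicateFinderLoopB, if_neg (fun hc => h.1 hc.1.symm)]
    rw [ih (i + 1) h.2]
    simp only [List.length_cons]
    ring_nf

-- Main loop equivalence: A's cursor loop from 'start' equals B's pass over the dropped suffix.
theorem loopA_eq_loopB (listInput : List Int) (item : Int) (used : List Int) (start : Nat) :
    duplicateFinderLoopA listInput item used start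
      = duplicateFinderLoopB (listInput.drop start) item used start := by
  induction hn : listInput.length - start using Nat.strong_induction_on generalizing start with
  | _ n ih =>
  rw [duplicateFinderLoopA]
  split
  · rename_i h
    rw [PySem.List.index?_eq_none_iff] at h
    rw [loopB_of_not_mem _ _ _ _ h]
  · rename_i k h
    obtain ⟨pre, suf, hsplit, hlen, hpre⟩ := (PySem.List.index?_eq_some_iff _ _ _).mp h
    have hk : k < listInput.length - start := by
      have h1 := congrArg List.length hsplit
      simp only [List.length_drop, List.length_append, List.length_cons] at h1
      omega
    rw [hsplit, loopB_append_not_mem _ _ _ _ _ hpre, hlen]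
    rw [duplicateFinderLoopB]
    by_cases hmem : ((start + k : Nat) : Int) ∈ used
    · rw [if_pos hmem, if_neg (fun hc => hc.2 (by push_cast at hmem ⊢; exact hmem))]
      rw [ih (listInput.length - (start + k + 1)) (by omega) (start + k + 1) rfl]
      have hdrop : listInput.drop (start + k + 1) = suf := by
        have h2 : listInput.drop (start + k + 1) = (listInput.drop start).drop (k + 1) := by
          rw [List.drop_drop]; ring_nf
        have h3 : pre ++ item :: suf = (pre ++ [item]) ++ suf := by simp
        have h4 : (pre ++ [item]).length = k + 1 := by simp [hlen]
        rw [h2, hsplit, h3, ← h4, List.drop_left]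
      rw [hdrop]
    · rw [if_neg hmem, if_pos ⟨rfl, by push_cast at hmem ⊢; exact hmem⟩]

-- ===== VERDICT (by name: the statement is the Claim_ definition above) =====
theorem duplicateFinder_spec : Claim_equal_duplicateFinder := by
  intro listInput item usedList _
  unfold Spec_duplicateFinder duplicateFinder duplicateFinder_alt
  simpa using loopA_eq_loopB listInput item usedList 0
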